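-- pv_equiv track=rewrite | github.com/Pratinav-Shrivastava/CSES | Sorting_and_Searching/Apartments.py | apartments
-- ===== SOURCE A (Python) =====
-- def apartments(desired, sizes, k):
--     desired.sort()
--     sizes.sort()
--
--     i, j = 0, 0
--     given = 0
--     while i < len(desired) and j < len(sizes):
--         if abs(desired[i] - sizes[j]) <= k:
--             given += 1
--             i += 1
--             j += 1
--         else:
--             if sizes[j] < desired[i]:
--                 j += 1
--             else:
--                 i += 1
--     return given
-- ===== SOURCE B (Python) =====
-- def apartments(desired, sizes, k):
--     desired.sort()
--     sizes.sort()
--     # Bottom-up DP over suffix pairs: prev[j] is the maximum number of matches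
--     # achievable between the applicants not yet processed and sizes[j:].
--     prev = [0] * (len(sizes) + 1)
--     for a in reversed(desired):
--         cur = [0] * (len(sizes) + 1)
--         for j in range(len(sizes) - 1, -1, -1):
--             best = max(prev[j], cur[j + 1])
--             if abs(a - sizes[j]) <= k:
--                 best = max(best, 1 + prev[j + 1])
--             cur[j] = best
--         prev = cur
--     return prev[0]
-- ===== Notes on version B (the rewrite author's own statement) =====
-- stated objective: alternative
-- what changed: Replaces A's greedy two-pointer scan over the two sorted lists with a bottom-up dynamic program (LCS-style table over suffix pairs) that computes the maximum ordered matching within tolerance k; on sorted lists the greedy count equals this optimum, which the Lean proof establishes via skip/exchange lemmas.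
import Mathlib
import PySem

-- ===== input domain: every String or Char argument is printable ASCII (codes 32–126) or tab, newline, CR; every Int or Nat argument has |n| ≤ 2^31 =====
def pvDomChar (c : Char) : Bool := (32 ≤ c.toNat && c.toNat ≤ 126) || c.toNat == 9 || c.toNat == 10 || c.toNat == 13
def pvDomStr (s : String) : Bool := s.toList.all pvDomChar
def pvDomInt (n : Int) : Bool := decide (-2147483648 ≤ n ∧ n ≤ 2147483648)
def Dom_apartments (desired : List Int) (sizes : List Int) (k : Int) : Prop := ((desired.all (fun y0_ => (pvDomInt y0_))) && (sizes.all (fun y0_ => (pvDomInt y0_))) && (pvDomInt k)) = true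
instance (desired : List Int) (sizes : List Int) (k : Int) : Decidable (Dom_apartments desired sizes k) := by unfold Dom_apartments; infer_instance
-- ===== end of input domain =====

-- B replaces A's greedy two-pointer scan with a bottom-up dynamic program over suffix pairs
-- computing the maximum ordered matching (objective: alternative algorithm, not faster).
-- Both Pythons sort their list arguments in place (same mutation); the equivalence proved
-- is about the return value.

-- ===== PORT A =====
-- A's while-loop advances i or j by one each step, reading only desired[i] and sizes[j]:
-- ported as the obvious recursion over the suffixes desired[i:], sizes[j:], with 'given'
-- accumulated as 1 + …, which equals the counter.
def apartmentsLoopA (k : Int) : List Int → List Int → Int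
  | a :: ds, b :: ss =>
      if |a - b| ≤ k then 1 + apartmentsLoopA k ds ss
      else if b < a then apartmentsLoopA k (a :: ds) ss
      else apartmentsLoopA k ds (b :: ss)
  | _, _ => 0
termination_by ds ss => ds.length + ss.length

def apartments (desired : List Int) (sizes : List Int) (k : Int) : Int :=
  apartmentsLoopA k (PySem.List.sorted desired (fun x => x) false)
    (PySem.List.sorted sizes (fun x => x) false)

-- ===== PORT B =====
-- B's inner loop fills cur[j] from j = len(sizes)-1 down to 0, reading sizes[j], prev[j],
-- prev[j+1] and cur[j+1]: ported as a recursion aligned on (sizes suffix, prev suffix)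
-- producing the cur row back-to-front; the trailing [0] is cur[len(sizes)] = 0.
def apartmentsRow (k a : Int) : List Int → List Int → List Int
  | [], _ => [0]
  | b :: ss, prev =>
      let rest := apartmentsRow k a ss prev.tail
      let best := max (prev.headD 0) (rest.headD 0)
      let best := if |a - b| ≤ k then max best (1 + prev.tail.headD 0) else best
      best :: rest

-- B's outer loop runs over reversed(desired) threading prev: a foldr over desired.
def apartments_alt (desired : List Int) (sizes : List Int) (k : Int) : Int :=
  let ds := PySem.List.sorted desired (fun x => x) false
  let ss := PySem.List.sorted sizes (fun x => x) false
  (ds.foldr (fun a prev => apartmentsRow k a ss prev)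
      (List.replicate (ss.length + 1) 0)).headD 0

-- ===== PRECONDITION & SPEC =====
def Spec_apartments (desired : List Int) (sizes : List Int) (k : Int) (out : Int) : Prop := out = apartments_alt desired sizes k
instance (desired : List Int) (sizes : List Int) (k : Int) (out : Int) : Decidable (Spec_apartments desired sizes k out) := by unfold Spec_apartments; infer_instance

-- ===== CLAIM (what is proved, stated in full; the proofs are below) =====
def Claim_equal_apartments : Prop := ∀ (desired : List Int) (sizes : List Int) (k : Int), Dom_apartments desired sizes k → Spec_apartments desired sizes k (apartments desired sizes k)

-- ===== LEMMAS AND PROOFS =====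

-- mm k ds ss: the value B's DP assigns to the suffix pair (ds, ss) — the maximum ordered
-- matching of ds against ss within tolerance k, in the shape cur[j] is computed.
def mm (k : Int) : List Int → List Int → Int
  | a :: ds, b :: ss =>
      if |a - b| ≤ k then max (max (mm k ds (b :: ss)) (mm k (a :: ds) ss)) (1 + mm k ds ss)
      else max (mm k ds (b :: ss)) (mm k (a :: ds) ss)
  | _, _ => 0
termination_by ds ss => ds.length + ss.length

lemma mm_nil_right (k : Int) (ds : List Int) : mm k ds [] = 0 := by
  cases ds <;> simp [mm]

lemma mm_nil_left (k : Int) (ss : List Int) : mm k [] ss = 0 := by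
  cases ss <;> simp [mm]

lemma mm_cons_left_le (k a : Int) (ds ss : List Int) : mm k ds ss ≤ mm k (a :: ds) ss := by
  cases ss with
  | nil => simp [mm_nil_right]
  | cons b ss =>
      rw [mm]
      split <;> simp

lemma mm_cons_right_le (k b : Int) (ds ss : List Int) : mm k ds ss ≤ mm k ds (b :: ss) := by
  cases ds with
  | nil => simp [mm_nil_left]
  | cons a ds =>
      rw [mm]
      split <;> simp

-- removing the head of either list lowers mm by at most one
lemma mm_drop_right_le (k b : Int) : ∀ ds ss, mm k ds (b :: ss) ≤ 1 + mm k ds ss := by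
  intro ds
  induction ds with
  | nil => intro ss; rw [mm_nil_left, mm_nil_left]; omega
  | cons a ds ih =>
      intro ss
      rw [mm]
      have h1 : mm k ds (b :: ss) ≤ 1 + mm k (a :: ds) ss :=
        le_trans (ih ss) (by have := mm_cons_left_le k a ds ss; omega)
      have h2 : mm k (a :: ds) ss ≤ 1 + mm k (a :: ds) ss := by omega
      have h3 : 1 + mm k ds ss ≤ 1 + mm k (a :: ds) ss := by
        have := mm_cons_left_le k a ds ss; omega
      split
      · exact max_le (max_le h1 h2) h3
      · exact max_le h1 h2

lemma mm_drop_left_le (k a : Int) (ds : List Int) : ∀ ss, mm k (a :: ds) ss ≤ 1 + mm k ds ss := by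
  intro ss
  induction ss with
  | nil => rw [mm_nil_right, mm_nil_right]; omega
  | cons b ss ih =>
      rw [mm]
      have h1 : mm k ds (b :: ss) ≤ 1 + mm k ds (b :: ss) := by omega
      have h2 : mm k (a :: ds) ss ≤ 1 + mm k ds (b :: ss) :=
        le_trans ih (by have := mm_cons_right_le k b ds ss; omega)
      have h3 : 1 + mm k ds ss ≤ 1 + mm k ds (b :: ss) := by
        have := mm_cons_right_le k b ds ss; omega
      split
      · exact max_le (max_le h1 h2) h3
      · exact max_le h1 h2

-- an apartment smaller (by more than k) than every remaining applicant matches nobody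
lemma mm_skip_right (k b : Int) (ss : List Int) :
    ∀ ds, (∀ x ∈ ds, b + k < x) → mm k ds (b :: ss) = mm k ds ss := by
  intro ds
  induction ds with
  | nil => intro _; rw [mm_nil_left, mm_nil_left]
  | cons a ds ih =>
      intro h
      have ha : b + k < a := h a (by simp)
      have habs : ¬ |a - b| ≤ k := by rw [abs_le]; omega
      rw [mm, if_neg habs, ih (fun x hx => h x (by simp [hx]))]
      exact max_eq_right (mm_cons_left_le k a ds ss)

-- an applicant wanting less (by more than k) than every remaining apartment matches nothing
lemma mm_skip_left (k a : Int) (ds : List Int) :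
    ∀ ss, (∀ y ∈ ss, a + k < y) → mm k (a :: ds) ss = mm k ds ss := by
  intro ss
  induction ss with
  | nil => intro _; rw [mm_nil_right, mm_nil_right]
  | cons b ss ih =>
      intro h
      have hb : a + k < b := h b (by simp)
      have habs : ¬ |a - b| ≤ k := by rw [abs_le]; omega
      rw [mm, if_neg habs, ih (fun y hy => h y (by simp [hy]))]
      exact max_eq_left (mm_cons_right_le k b ds ss)

-- On sorted lists A's greedy scan computes exactly the DP value.
lemma loopA_eq_mm (k : Int) : ∀ ds ss, ds.Pairwise (· ≤ ·) → ss.Pairwise (· ≤ ·) →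
    apartmentsLoopA k ds ss = mm k ds ss := by
  intro ds ss
  induction hn : ds.length + ss.length using Nat.strong_induction_on generalizing ds ss with
  | _ n ih =>
    intro hd hs
    cases ds with
    | nil => rw [mm_nil_left]; simp [apartmentsLoopA]
    | cons a ds =>
      cases ss with
      | nil => rw [mm_nil_right]; simp [apartmentsLoopA]
      | cons b ss =>
        rw [apartmentsLoopA, mm]
        by_cases habs : |a - b| ≤ k
        · rw [if_pos habs, if_pos habs]
          have e1 : mm k ds (b :: ss) ≤ 1 + mm k ds ss := mm_drop_right_le k b ds ss
          have e2 : mm k (a :: ds) ss ≤ 1 + mm k ds ss := mm_drop_left_le k a ds ss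
          rw [max_eq_right (max_le e1 e2)]
          rw [ih (ds.length + ss.length) (by simp_all; omega) ds ss rfl
              (List.Pairwise.of_cons hd) (List.Pairwise.of_cons hs)]
        · rw [if_neg habs, if_neg habs]
          by_cases hba : b < a
          · rw [if_pos hba]
            have hbk : b + k < a := by rw [abs_le] at habs; omega
            have hall : ∀ x ∈ a :: ds, b + k < x := by
              intro x hx
              rcases List.mem_cons.mp hx with h | h
              · omega
              · have := (List.pairwise_cons.mp hd).1 x h; omega
            rw [show (max (mm k ds (b :: ss)) (mm k (a :: ds) ss)) = mm k (a :: ds) (b :: ss) by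
                  rw [mm, if_neg habs],
                mm_skip_right k b ss (a :: ds) hall]
            exact ih ((a :: ds).length + ss.length) (by simp_all; omega) (a :: ds) ss rfl hd
              (List.Pairwise.of_cons hs)
          · rw [if_neg hba]
            have hak : a + k < b := by rw [abs_le] at habs; omega
            have hall : ∀ y ∈ b :: ss, a + k < y := by
              intro y hy
              rcases List.mem_cons.mp hy with h | h
              · omega
              · have := (List.pairwise_cons.mp hs).1 y h; omega
            rw [show (max (mm k ds (b :: ss)) (mm k (a :: ds) ss)) = mm k (a :: ds) (b :: ss) by
                  rw [mm, if_neg habs],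
                mm_skip_left k a ds (b :: ss) hall]
            exact ih (ds.length + (b :: ss).length) (by simp_all; omega) ds (b :: ss) rfl
              (List.Pairwise.of_cons hd) hs

-- suffRow k ds ss: the row B's DP holds after processing ds, indexed by suffixes of ss.
def suffRow (k : Int) (ds ss : List Int) : List Int := ss.tails.map (mm k ds)

lemma suffRow_head (k : Int) (ds ss : List Int) : (suffRow k ds ss).headD 0 = mm k ds ss := by
  cases ss <;> simp [suffRow]

lemma suffRow_nil_left (k : Int) (ss : List Int) :
    suffRow k [] ss = List.replicate (ss.length + 1) 0 := by
  induction ss with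
  | nil => simp [suffRow, mm_nil_left]
  | cons b ss ih => simpa [suffRow, mm_nil_left, List.replicate_succ] using ih

lemma row_step (k a : Int) (ds : List Int) : ∀ ss,
    apartmentsRow k a ss (suffRow k ds ss) = suffRow k (a :: ds) ss := by
  intro ss
  induction ss with
  | nil => simp [apartmentsRow, suffRow, mm_nil_right]
  | cons b ss ih =>
      rw [apartmentsRow]
      have htail : (suffRow k ds (b :: ss)).tail = suffRow k ds ss := by
        simp [suffRow]
      have hhead : (suffRow k ds (b :: ss)).headD 0 = mm k ds (b :: ss) := suffRow_head ..
      rw [htail, ih, hhead, suffRow_head, suffRow_head]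
      show (if |a - b| ≤ k then
              max (max (mm k ds (b :: ss)) (mm k (a :: ds) ss)) (1 + mm k ds ss)
            else max (mm k ds (b :: ss)) (mm k (a :: ds) ss)) :: suffRow k (a :: ds) ss
          = suffRow k (a :: ds) (b :: ss)
      rw [← mm]
      simp [suffRow]

lemma foldr_rows (k : Int) (ss : List Int) : ∀ ds,
    ds.foldr (fun a prev => apartmentsRow k a ss prev) (List.replicate (ss.length + 1) 0)
      = suffRow k ds ss := by
  intro ds
  induction ds with
  | nil => rw [List.foldr_nil, suffRow_nil_left]
  | cons a ds ih => rw [List.foldr_cons, ih, row_step]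

-- ===== VERDICT (by name: the statement is the Claim_ definition above) =====
theorem apartments_spec : Claim_equal_apartments := by
  intro desired sizes k _
  unfold Spec_apartments apartments apartments_alt
  dsimp only
  rw [foldr_rows, suffRow_head]
  exact loopA_eq_mm k _ _
    (by simpa using PySem.List.sorted_pairwise desired (fun x => x) )
    (by simpa using PySem.List.sorted_pairwise sizes (fun x => x) )
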